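-- pv_equiv track=rewrite | github.com/mmacy/vibe-o-matic | textual-tui/textual_tui/orchestrator/git_service.py | _truncate_hunks
-- ===== SOURCE A (Python) =====
-- def _truncate_hunks(diff: str, max_hunks: int) -> str:
--     """Truncate diff to max_hunks hunks.
--
--     Args:
--         diff: The full diff output.
--         max_hunks: Maximum number of hunks to keep.
--
--     Returns:
--         Truncated diff.
--     """
--     lines = diff.split("\n")
--     result_lines = []
--     hunk_count = 0
--
--     for line in lines:
--         if line.startswith("@@"):
--             hunk_count += 1
--             if hunk_count > max_hunks:
--                 result_lines.append("[TRUNCATED_HUNKS]")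
--                 break
--
--         result_lines.append(line)
--
--     return "\n".join(result_lines)
-- ===== SOURCE B (Python) =====
-- def _truncate_hunks(diff: str, max_hunks: int) -> str:
--     """Truncate diff to max_hunks hunks (index-then-slice)."""
--     lines = diff.split("\n")
--     hunk_indices = [i for i, line in enumerate(lines) if line.startswith("@@")]
--     keep = max(max_hunks, 0)
--     if len(hunk_indices) <= keep:
--         return "\n".join(lines)
--     cut = hunk_indices[keep]
--     return "\n".join(lines[:cut] + ["[TRUNCATED_HUNKS]"])
-- ===== Notes on version B (the rewrite author's own statement) =====
-- stated objective: alternative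
-- what changed: Replaced A's stateful single-pass scan with a counter and break by an index-then-slice computation: collect the indices of all '@@' lines, compare their count against max(max_hunks, 0), and slice the line list at the index of the first hunk past the limit.
import Mathlib
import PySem

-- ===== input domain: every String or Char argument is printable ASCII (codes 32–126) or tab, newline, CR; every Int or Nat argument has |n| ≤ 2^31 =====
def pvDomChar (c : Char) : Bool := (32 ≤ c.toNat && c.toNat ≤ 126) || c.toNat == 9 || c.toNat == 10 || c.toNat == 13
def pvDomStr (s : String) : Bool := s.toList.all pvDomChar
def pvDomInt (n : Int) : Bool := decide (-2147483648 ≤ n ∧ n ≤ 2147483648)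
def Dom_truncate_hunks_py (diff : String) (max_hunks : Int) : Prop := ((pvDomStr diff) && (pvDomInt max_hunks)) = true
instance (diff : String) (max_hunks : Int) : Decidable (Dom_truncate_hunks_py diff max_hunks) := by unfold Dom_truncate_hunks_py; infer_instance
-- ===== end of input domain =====

-- B replaces A's stateful scan-with-break by an index-then-slice computation (collect hunk-marker
-- indices, then slice at the first index beyond the limit); objective: alternative decomposition.


-- ===== PORT A =====
-- A's for-loop with `break`: structural recursion over the remaining lines carrying hunk_count.
def truncA_loop (max_hunks : Int) (hunk_count : Int) : List String → List String
  | [] => []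
  | line :: rest =>
    if PySem.Str.startswith line "@@" then
      if hunk_count + 1 > max_hunks then ["[TRUNCATED_HUNKS]"]
      else line :: truncA_loop max_hunks (hunk_count + 1) rest
    else line :: truncA_loop max_hunks hunk_count rest

def truncate_hunks_py (diff : String) (max_hunks : Int) : String :=
  let lines := (PySem.Str.split? diff "\n").getD []   -- sep = "\n" ≠ "": split? is always some
  PySem.Str.join "\n" (truncA_loop max_hunks 0 lines)

-- ===== PORT B =====
def truncate_hunks_py_alt (diff : String) (max_hunks : Int) : String :=
  let lines := (PySem.Str.split? diff "\n").getD []   -- sep = "\n" ≠ "": split? is always some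
  let hunk_indices := (PySem.List.enumerate lines).filterMap
    (fun p => if PySem.Str.startswith p.2 "@@" then some p.1 else none)
  let keep := max max_hunks 0
  if (hunk_indices.length : Int) ≤ keep then PySem.Str.join "\n" lines
  else
    let cut := PySem.List.pyGetD hunk_indices keep 0   -- in range: keep < len(hunk_indices)
    PySem.Str.join "\n" (PySem.List.slice lines none (some cut) ++ ["[TRUNCATED_HUNKS]"])

-- ===== PRECONDITION & SPEC =====
def Spec_truncate_hunks_py (diff : String) (max_hunks : Int) (out : String) : Prop := out = truncate_hunks_py_alt diff max_hunks
instance (diff : String) (max_hunks : Int) (out : String) : Decidable (Spec_truncate_hunks_py diff max_hunks out) := by unfold Spec_truncate_hunks_py; infer_instance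

-- ===== CLAIM (what is proved, stated in full; the proofs are below) =====
def Claim_equal_truncate_hunks_py : Prop := ∀ (diff : String) (max_hunks : Int), Dom_truncate_hunks_py diff max_hunks → Spec_truncate_hunks_py diff max_hunks (truncate_hunks_py diff max_hunks)

-- ===== LEMMAS AND PROOFS =====

-- a Nat-budget version of A's loop: budget d = number of further hunk markers kept
def truncN : Nat → List String → List String
  | _, [] => []
  | d, line :: rest =>
    if PySem.Str.startswith line "@@" then
      match d with
      | 0 => ["[TRUNCATED_HUNKS]"]
      | e + 1 => line :: truncN e rest
    else line :: truncN d rest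

theorem truncA_eq_truncN (ls : List String) : ∀ (m c : Int),
    truncA_loop m c ls = truncN (m - c).toNat ls := by
  induction ls with
  | nil => intro m c; rfl
  | cons l rest ih =>
    intro m c
    simp only [truncA_loop, truncN]
    by_cases h : PySem.Str.startswith l "@@" = true
    · simp only [h, if_true]
      by_cases hb : c + 1 > m
      · have h0 : (m - c).toNat = 0 := by omega
        rw [h0]
        simp [hb]
      · have : (m - c).toNat = (m - (c + 1)).toNat + 1 := by omega
        rw [this]
        simp [hb, ih]
    · rw [if_neg h, if_neg h, ih]

def hunkIdxs (ls : List String) : List Int :=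
  (PySem.List.enumerate ls).filterMap
    (fun p => if PySem.Str.startswith p.2 "@@" then some p.1 else none)

theorem enumerate_shift {α : Type} (ls : List α) : ∀ (s : Int),
    PySem.List.enumerate ls s = (PySem.List.enumerate ls 0).map (fun p => (p.1 + s, p.2)) := by
  induction ls with
  | nil => intro s; rfl
  | cons x rest ih =>
    intro s
    rw [PySem.List.enumerate_cons, PySem.List.enumerate_cons, ih (0 + 1), ih (s + 1)]
    simp [Function.comp]
    intro a b _
    ring

theorem hunkIdxs_cons (l : String) (ls : List String) :
    hunkIdxs (l :: ls) =
      (if PySem.Str.startswith l "@@" then [(0 : Int)] else []) ++ (hunkIdxs ls).map (· + 1) := by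
  simp only [hunkIdxs, PySem.List.enumerate_cons, List.filterMap_cons]
  rw [enumerate_shift ls (0 + 1), List.filterMap_map, List.map_filterMap]
  by_cases h : PySem.Chars.startswith l.toList "@@".toList = true <;>
    simp at h <;> simp [h, Function.comp, apply_ite]

theorem hunkIdxs_nonneg (ls : List String) : ∀ i ∈ hunkIdxs ls, 0 ≤ i := by
  induction ls with
  | nil => intro i hi; simp [hunkIdxs] at hi
  | cons l rest ih =>
    intro i hi
    rw [hunkIdxs_cons] at hi
    rcases List.mem_append.mp hi with h | h
    · split at h <;> simp at h; omega
    · obtain ⟨j, hj, rfl⟩ := List.mem_map.mp h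
      have := ih j hj; omega

-- characterisation of the Nat-budget loop via the hunk indices
theorem truncN_eq (ls : List String) : ∀ (d : Nat),
    truncN d ls =
      if (hunkIdxs ls).length ≤ d then ls
      else ls.take ((hunkIdxs ls).getD d 0).toNat ++ ["[TRUNCATED_HUNKS]"] := by
  induction ls with
  | nil => intro d; simp [truncN, hunkIdxs]
  | cons l rest ih =>
    intro d
    rw [hunkIdxs_cons]
    by_cases h : PySem.Str.startswith l "@@" = true
    · simp only [h, if_true]
      cases d with
      | zero =>
        simp only [truncN, h, if_true, List.singleton_append, List.length_cons,
          List.getD_cons_zero]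
        rw [if_neg (by omega)]
        simp
      | succ e =>
        simp only [truncN, h, if_true, ih e, List.singleton_append, List.length_cons,
          List.length_map, List.getD_cons_succ, Nat.add_le_add_iff_right]
        by_cases he : (hunkIdxs rest).length ≤ e
        · simp [he]
        · have he' : e < (hunkIdxs rest).length := by omega
          have hnn : 0 ≤ (hunkIdxs rest).getD e 0 := by
            rw [List.getD_eq_getElem _ _ he']
            exact hunkIdxs_nonneg rest _ (List.getElem_mem he')
          have hmap : ((hunkIdxs rest).map (· + 1)).getD e 0 = (hunkIdxs rest).getD e 0 + 1 := by
            rw [List.getD_eq_getElem _ _ (by simpa using he'), List.getD_eq_getElem _ _ he']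
            simp
          simp only [he, if_false, hmap]
          have : ((hunkIdxs rest).getD e 0 + 1).toNat = ((hunkIdxs rest).getD e 0).toNat + 1 := by
            omega
          rw [this, List.take_succ_cons, List.cons_append]
    · simp only [truncN, h, Bool.false_eq_true, if_false, List.nil_append, ih d,
        List.length_map]
      by_cases hd : (hunkIdxs rest).length ≤ d
      · simp [hd]
      · have hd' : d < (hunkIdxs rest).length := by omega
        have hnn : 0 ≤ (hunkIdxs rest).getD d 0 := by
          rw [List.getD_eq_getElem _ _ hd']
          exact hunkIdxs_nonneg rest _ (List.getElem_mem hd')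
        have hmap : ((hunkIdxs rest).map (· + 1)).getD d 0 = (hunkIdxs rest).getD d 0 + 1 := by
          rw [List.getD_eq_getElem _ _ (by simpa using hd'), List.getD_eq_getElem _ _ hd']
          simp
        simp only [hd, if_false, hmap]
        have : ((hunkIdxs rest).getD d 0 + 1).toNat = ((hunkIdxs rest).getD d 0).toNat + 1 := by
          omega
        rw [this, List.take_succ_cons, List.cons_append]

-- ===== VERDICT (by name: the statement is the Claim_ definition above) =====
theorem truncate_hunks_py_spec : Claim_equal_truncate_hunks_py := by
  intro diff m _
  unfold Spec_truncate_hunks_py truncate_hunks_py truncate_hunks_py_alt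
  set lines := (PySem.Str.split? diff "\n").getD [] with hl
  simp only []
  rw [truncA_eq_truncN, truncN_eq]
  have hIdx : ((PySem.List.enumerate lines).filterMap
      (fun p => if PySem.Str.startswith p.2 "@@" then some p.1 else none)) = hunkIdxs lines := rfl
  rw [hIdx]
  have hm0 : (m - 0).toNat = (max m 0).toNat := by omega
  rw [hm0]
  by_cases hc : ((hunkIdxs lines).length : Int) ≤ max m 0
  · rw [if_pos (show (hunkIdxs lines).length ≤ (max m 0).toNat by omega), if_pos hc]
  · rw [if_neg (show ¬ (hunkIdxs lines).length ≤ (max m 0).toNat by omega), if_neg hc]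
    rw [PySem.List.pyGetD_of_nonneg (hunkIdxs lines) 0 (by omega)]
    have hlt : (max m 0).toNat < (hunkIdxs lines).length := by omega
    have hnn : (0:Int) ≤ (hunkIdxs lines).getD (max m 0).toNat 0 := by
      rw [List.getD_eq_getElem _ _ hlt]
      exact hunkIdxs_nonneg lines _ (List.getElem_mem hlt)
    rw [PySem.List.slice_to lines hnn]
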